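-- pv_equiv track=rewrite | github.com/BrettGoreham/AdventOfCode2023 | day12/day12.py | count_valid
-- ===== SOURCE A (Python) =====
-- def count_valid(_string, _filled, _expected_groups):
--     g_count = 0
--     g = 0
--     _groups = []
--     for x in range(len(_string)):
--         if _string[x] == '#' or x in _filled:
--             g += 1
--         elif g > 0:
--             if _expected_groups[g_count] != g:
--                 return False
--             g = 0
--             g_count += 1
--
--     if 0 != g == _expected_groups[g_count]:
--         g_count += 1
--
--     if g_count != len(_expected_groups):
--         return False
--     return True
-- ===== SOURCE B (Python) =====
-- def count_valid(_string, _filled, _expected_groups):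
--     actual = []
--     run = 0
--     for x in range(len(_string)):
--         if _string[x] == '#' or x in _filled:
--             run += 1
--         else:
--             if run:
--                 actual.append(run)
--             run = 0
--     if run:
--         actual.append(run)
--     return actual == _expected_groups
-- ===== Notes on version B (the rewrite author's own statement) =====
-- stated objective: simpler
-- what changed: B first materialises the list of run-lengths of filled positions and then compares it to _expected_groups by a single list equality, instead of A's interleaved compare-while-scanning with a group counter, early returns and a post-loop chained-comparison fixup.
-- outside the precondition, e.g. on count_valid('#', set(), []): A raises IndexError, B returns False; on count_valid('#.#', set(), [1]): A raises IndexError, B returns False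
-- crash fix: A raises IndexError whenever _expected_groups is a proper prefix of the actual run-length list (more runs than expected entries with all earlier runs matching); B returns False there. — e.g. on count_valid("#.#", [], [1]): A raises IndexError, B returns false
import Mathlib
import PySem

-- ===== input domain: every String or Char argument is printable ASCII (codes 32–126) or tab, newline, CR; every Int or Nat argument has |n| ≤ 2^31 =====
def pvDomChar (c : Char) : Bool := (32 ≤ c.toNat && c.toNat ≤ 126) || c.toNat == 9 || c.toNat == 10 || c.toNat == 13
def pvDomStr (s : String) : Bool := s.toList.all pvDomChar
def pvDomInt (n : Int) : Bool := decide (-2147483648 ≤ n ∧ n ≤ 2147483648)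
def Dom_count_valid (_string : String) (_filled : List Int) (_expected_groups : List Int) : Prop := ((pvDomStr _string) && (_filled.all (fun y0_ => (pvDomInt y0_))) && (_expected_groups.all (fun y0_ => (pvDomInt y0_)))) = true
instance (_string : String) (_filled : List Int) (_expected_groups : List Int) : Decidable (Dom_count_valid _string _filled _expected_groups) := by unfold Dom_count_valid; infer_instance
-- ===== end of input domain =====

-- B builds the run-length list of filled positions once and compares it to _expected_groups by
-- plain list equality, instead of A's interleaved compare-while-scanning with a group counter.

-- ===== PORT A =====
-- loop over x in range(len(_string)) with state g_count, g; early return False = returning false;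
-- _expected_groups[g_count] is PySem.List.pyGet? (none = IndexError, excluded by Pre_, port yields false there)
def countValidGo (_filled _expected_groups : List Int) : List Char → Int → Nat → Int → Bool
  | [], _, g_count, g =>
      -- `if 0 != g == _expected_groups[g_count]: g_count += 1` (chained, short-circuit on g == 0)
      let g_count' := if g ≠ 0 ∧ PySem.List.pyGet? _expected_groups ((g_count : Nat) : Int) = some g
                      then g_count + 1 else g_count
      g_count' == _expected_groups.length
  | c :: rest, x, g_count, g =>
      if c = '#' ∨ x ∈ _filled then
        countValidGo _filled _expected_groups rest (x + 1) g_count (g + 1)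
      else if g > 0 then
        -- `if _expected_groups[g_count] != g: return False`; pyGet? = none is IndexError
        -- in Python (outside Pre_count_valid, where the port yields false)
        if PySem.List.pyGet? _expected_groups ((g_count : Nat) : Int) ≠ some g then false
        else countValidGo _filled _expected_groups rest (x + 1) (g_count + 1) 0
      else countValidGo _filled _expected_groups rest (x + 1) g_count g

def count_valid (_string : String) (_filled : List Int) (_expected_groups : List Int) : Bool :=
  countValidGo _filled _expected_groups _string.toList 0 0 0

-- ===== PORT B =====
-- `actual` built by appending a run-length whenever a non-filled position closes a positive run
def pvRunsGo (_filled : List Int) : List Char → Int → Int → List Int → List Int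
  | [], _, run, actual => if run ≠ 0 then actual ++ [run] else actual
  | c :: rest, x, run, actual =>
      if c = '#' ∨ x ∈ _filled then pvRunsGo _filled rest (x + 1) (run + 1) actual
      else pvRunsGo _filled rest (x + 1) 0 (if run ≠ 0 then actual ++ [run] else actual)

def pvRuns (_string : String) (_filled : List Int) : List Int :=
  pvRunsGo _filled _string.toList 0 0 []

def count_valid_alt (_string : String) (_filled : List Int) (_expected_groups : List Int) : Bool :=
  pvRuns _string _filled == _expected_groups

-- ===== PRECONDITION & SPEC =====
-- A raises IndexError exactly when _expected_groups is a PROPER prefix of the run-length list of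
-- filled positions (more runs than expected entries, all earlier runs matching); Pre_ excludes
-- exactly those inputs. On every other input A returns normally.
def Pre_count_valid (_string : String) (_filled : List Int) (_expected_groups : List Int) : Prop :=
  ¬ (_expected_groups <+: pvRuns _string _filled ∧ _expected_groups ≠ pvRuns _string _filled)
instance (_string : String) (_filled : List Int) (_expected_groups : List Int) : Decidable (Pre_count_valid _string _filled _expected_groups) := by unfold Pre_count_valid; infer_instance

def pvWitness_count_valid : String × List Int × List Int := ("#.#", [1], [3])

-- A raises IndexError whenever _expected_groups is a proper prefix of the actual run-length list
-- (more runs than expected entries with all earlier runs matching); B returns False there.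
def Raises_count_valid (_string : String) (_filled : List Int) (_expected_groups : List Int) : Prop :=
  _expected_groups <+: pvRuns _string _filled ∧ _expected_groups ≠ pvRuns _string _filled
instance (_string : String) (_filled : List Int) (_expected_groups : List Int) : Decidable (Raises_count_valid _string _filled _expected_groups) := by unfold Raises_count_valid; infer_instance
def pvRaiseWitness_count_valid : String × List Int × List Int := ("#.#", [], [1])
def pvRaiseWitnessOut_count_valid : Bool := false

def Spec_count_valid (_string : String) (_filled : List Int) (_expected_groups : List Int) (out : Bool) : Prop := out = count_valid_alt _string _filled _expected_groups
instance (_string : String) (_filled : List Int) (_expected_groups : List Int) (out : Bool) : Decidable (Spec_count_valid _string _filled _expected_groups out) := by unfold Spec_count_valid; infer_instance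

-- ===== CLAIM (what is proved, stated in full; the proofs are below) =====
def Claim_equal_count_valid : Prop := ∀ (_string : String) (_filled : List Int) (_expected_groups : List Int), Dom_count_valid _string _filled _expected_groups → Pre_count_valid _string _filled _expected_groups → Spec_count_valid _string _filled _expected_groups (count_valid _string _filled _expected_groups)
def Claim_raises_count_valid : Prop := (∀ (_string : String) (_filled : List Int) (_expected_groups : List Int), Dom_count_valid _string _filled _expected_groups → Raises_count_valid _string _filled _expected_groups → ¬ Pre_count_valid _string _filled _expected_groups) ∧ (Dom_count_valid (pvRaiseWitness_count_valid.1) (pvRaiseWitness_count_valid.2.1) (pvRaiseWitness_count_valid.2.2) ∧ Raises_count_valid (pvRaiseWitness_count_valid.1) (pvRaiseWitness_count_valid.2.1) (pvRaiseWitness_count_valid.2.2) ∧ count_valid_alt (pvRaiseWitness_count_valid.1) (pvRaiseWitness_count_valid.2.1) (pvRaiseWitness_count_valid.2.2) = pvRaiseWitnessOut_count_valid)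

-- ===== LEMMAS AND PROOFS =====

-- B's accumulator builds the run list left to right
lemma pvRunsGo_acc (f : List Int) :
    ∀ (cs : List Char) (x run : Int) (acc : List Int),
      pvRunsGo f cs x run acc = acc ++ pvRunsGo f cs x run [] := by
  intro cs
  induction cs with
  | nil => intro x run acc; simp only [pvRunsGo]; split <;> simp
  | cons c rest ih =>
      intro x run acc
      simp only [pvRunsGo]
      split
      · exact ih _ _ _
      · rw [ih, ih (acc := if run ≠ 0 then [] ++ [run] else [])]
        split <;> simp

-- Core invariant: A's scanner agrees with "remaining expected = remaining runs" whenever the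
-- remaining expected list is not a proper prefix of the remaining runs (A's IndexError case).
lemma go_eq (f e : List Int) :
    ∀ (cs : List Char) (x : Int) (g_count : Nat) (g : Int),
      0 ≤ g → g_count ≤ e.length →
      ¬ (e.drop g_count <+: pvRunsGo f cs x g [] ∧ e.drop g_count ≠ pvRunsGo f cs x g []) →
      countValidGo f e cs x g_count g = (e.drop g_count == pvRunsGo f cs x g []) := by
  intro cs
  induction cs with
  | nil =>
      intro x g_count g hg hle hnp
      simp only [countValidGo, pvRunsGo, List.nil_append] at hnp ⊢
      by_cases hgz : g = 0
      · subst hgz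
        rw [if_neg (by simp), if_neg (by simp)]
        rcases Nat.lt_or_ge g_count e.length with h | h
        · have h1 : (g_count == e.length) = false := by simp; omega
          have h2 : List.drop g_count e ≠ [] := by
            intro hc
            have := congrArg List.length hc
            simp only [List.length_drop, List.length_nil] at this
            omega
          simp [h1, h2]
        · have h0 : g_count = e.length := by omega
          simp [h0]
      · rw [if_pos hgz] at hnp ⊢
        rw [PySem.List.pyGet?_natCast]
        have hhead : e[g_count]? = (e.drop g_count).head? := by
          simp [List.head?_drop]
        cases hD : e.drop g_count with
        | nil =>
            rw [hD] at hnp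
            exact absurd ⟨by simp, by simp⟩ hnp
        | cons d D' =>
            rw [hD] at hhead
            simp only [List.head?_cons] at hhead
            have hlen : e.length = g_count + D'.length + 1 := by
              have h := congrArg List.length hD
              simp only [List.length_drop, List.length_cons] at h
              omega
            by_cases hdg : d = g
            · subst hdg
              rw [if_pos ⟨hgz, hhead⟩]
              cases D' with
              | nil => simp [hlen]
              | cons a as => simp [hlen]
            · rw [if_neg (by rintro ⟨-, h⟩; rw [hhead] at h; exact hdg (Option.some_inj.mp h))]
              have h1 : (g_count == e.length) = false := by simp; omega
              have h2 : (d :: D' == [g]) = false := by simp [hdg]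
              rw [h1, h2]
  | cons c rest ih =>
      intro x g_count g hg hle hnp
      simp only [countValidGo]
      by_cases hfill : c = '#' ∨ x ∈ f
      · rw [if_pos hfill]
        have hruns : pvRunsGo f (c :: rest) x g [] = pvRunsGo f rest (x + 1) (g + 1) [] := by
          simp [pvRunsGo, hfill]
        rw [hruns] at hnp
        rw [ih (x + 1) g_count (g + 1) (by omega) hle hnp, hruns]
      · rw [if_neg hfill]
        by_cases hgpos : g > 0
        · have hgne : g ≠ 0 := by omega
          have hruns : pvRunsGo f (c :: rest) x g [] = g :: pvRunsGo f rest (x + 1) 0 [] := by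
            simp only [pvRunsGo, if_neg hfill, if_pos hgne]
            rw [pvRunsGo_acc]
            simp
          rw [hruns] at hnp ⊢
          rw [if_pos hgpos]
          rw [PySem.List.pyGet?_natCast]
          have hhead : e[g_count]? = (e.drop g_count).head? := by
            simp [List.head?_drop]
          cases hD : e.drop g_count with
          | nil =>
              rw [hD] at hnp
              exact absurd ⟨by simp, by simp⟩ hnp
          | cons d D' =>
              rw [hD] at hhead hnp
              simp only [List.head?_cons] at hhead
              rw [hhead]
              have hglen : g_count < e.length := by
                have h := congrArg List.length hD
                simp only [List.length_drop, List.length_cons] at h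
                omega
              have hD' : e.drop (g_count + 1) = D' := by
                have : e.drop (g_count + 1) = (e.drop g_count).tail := by
                  rw [List.tail_drop]
                rw [this, hD]
                rfl
              by_cases hdg : d = g
              · subst hdg
                rw [if_neg (by simp)]
                rw [ih (x + 1) (g_count + 1) 0 le_rfl (by omega) (by
                      rw [hD']
                      rintro ⟨hp, hne⟩
                      exact hnp ⟨List.cons_prefix_cons.mpr ⟨rfl, hp⟩, by simp [hne]⟩)]
                rw [hD']
                simp
              · rw [if_pos (by simpa using hdg)]
                simp [hdg]
        · have hg0 : g = 0 := by omega
          subst hg0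
          rw [if_neg hgpos]
          have hruns : pvRunsGo f (c :: rest) x 0 [] = pvRunsGo f rest (x + 1) 0 [] := by
            simp [pvRunsGo, hfill]
          rw [hruns] at hnp
          rw [ih (x + 1) g_count 0 le_rfl hle hnp, hruns]

-- ===== VERDICT (by name: the statement is the Claim_ definition above) =====
theorem count_valid_spec : Claim_equal_count_valid := by
  intro s f e _hdom hpre
  unfold Spec_count_valid count_valid count_valid_alt
  unfold Pre_count_valid at hpre
  unfold pvRuns at hpre ⊢
  rw [go_eq f e s.toList 0 0 0 le_rfl (Nat.zero_le _) (by simpa using hpre)]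
  simp only [List.drop_zero]
  cases h : pvRunsGo f s.toList 0 0 [] == e
  · simp at h ⊢; exact fun hc => h hc.symm
  · simp at h ⊢; exact h.symm

@[simp]
theorem count_valid_raises : Claim_raises_count_valid := by
  unfold Claim_raises_count_valid
  constructor
  · intro s f e _ hr hp
    exact hp hr
  · exact ⟨by decide, by decide, by decide⟩
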